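-- pv_equiv track=rewrite | github.com/lebidul/biduleur | misenpageur/misenpageur/html_processing.py | split_events_into_blocks
-- ===== SOURCE A (Python) =====
-- def split_events_into_blocks(events, num_blocks=6):
--     total_lines = len(events)
--     lines_per_bloc = total_lines // num_blocks
--     extra_lines = total_lines % num_blocks
--
--     blocs = []
--     start = 0
--     for i in range(num_blocks):
--         end = start + lines_per_bloc + (1 if i < extra_lines else 0)
--         blocs.append(events[start:end])
--         start = end
--     return blocs
-- ===== SOURCE B (Python) =====
-- def split_events_into_blocks(events, num_blocks=6):
--     # Peel blocks off the BACK: the last of k balanced blocks always has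
--     # exactly len(rest)//k elements; build back-to-front, then reverse.
--     blocks = []
--     end = len(events)
--     for k in range(num_blocks, 0, -1):
--         size = end // k
--         blocks.append(events[end - size:end])
--         end -= size
--     blocks.reverse()
--     return blocks
-- ===== Notes on version B (the rewrite author's own statement) =====
-- stated objective: alternative
-- what changed: B peels balanced blocks off the BACK of the list (the last of k blocks always has exactly len(rest)//k elements), rebuilding the result back-to-front and reversing, instead of A's forward pass with a precomputed quotient/remainder and a running start offset.
import Mathlib
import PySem

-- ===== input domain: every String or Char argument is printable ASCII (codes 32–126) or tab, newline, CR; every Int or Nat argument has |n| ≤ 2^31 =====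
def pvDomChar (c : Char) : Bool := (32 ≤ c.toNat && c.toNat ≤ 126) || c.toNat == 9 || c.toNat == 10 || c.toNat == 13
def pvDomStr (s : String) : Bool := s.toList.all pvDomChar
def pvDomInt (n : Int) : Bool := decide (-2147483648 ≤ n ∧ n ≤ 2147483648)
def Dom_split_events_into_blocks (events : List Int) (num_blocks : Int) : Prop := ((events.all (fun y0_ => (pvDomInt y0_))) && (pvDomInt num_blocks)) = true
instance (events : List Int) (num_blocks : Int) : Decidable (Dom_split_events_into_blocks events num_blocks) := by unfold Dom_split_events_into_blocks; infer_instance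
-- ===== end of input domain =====

-- B peels balanced blocks off the BACK (last block of k has len//k elements, no precomputed
-- quotient/remainder, no running start), building the result back-to-front; objective: alternative.

-- ===== PORT A =====
def split_events_into_blocks (events : List Int) (num_blocks : Int) : List (List Int) :=
  let total_lines : Int := events.length
  let lines_per_bloc := PySem.Int.floordiv total_lines num_blocks
  let extra_lines := PySem.Int.mod total_lines num_blocks
  ((PySem.List.pyRange 0 num_blocks 1).foldl
    (fun (st : List (List Int) × Int) i =>
      let e := st.2 + lines_per_bloc + (if i < extra_lines then 1 else 0)
      (st.1 ++ [PySem.List.slice events (some st.2) (some e)], e))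
    ([], 0)).1

-- ===== PORT B =====
def split_events_into_blocks_alt (events : List Int) (num_blocks : Int) : List (List Int) :=
  (((PySem.List.pyRange num_blocks 0 (-1)).foldl
    (fun (st : List (List Int) × Int) k =>
      let size := PySem.Int.floordiv st.2 k
      (st.1 ++ [PySem.List.slice events (some (st.2 - size)) (some st.2)], st.2 - size))
    ([], (events.length : Int))).1).reverse

-- ===== PRECONDITION & SPEC =====
-- Pre_ excludes exactly num_blocks = 0, where Python A raises ZeroDivisionError.
def Pre_split_events_into_blocks (events : List Int) (num_blocks : Int) : Prop := num_blocks ≠ 0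
instance (events : List Int) (num_blocks : Int) : Decidable (Pre_split_events_into_blocks events num_blocks) := by unfold Pre_split_events_into_blocks; infer_instance
def pvWitness_split_events_into_blocks : List Int × Int := ([1, 2, 3, 4, 5], 3)

def Spec_split_events_into_blocks (events : List Int) (num_blocks : Int) (out : List (List Int)) : Prop := out = split_events_into_blocks_alt events num_blocks
instance (events : List Int) (num_blocks : Int) (out : List (List Int)) : Decidable (Spec_split_events_into_blocks events num_blocks out) := by unfold Spec_split_events_into_blocks; infer_instance

-- ===== CLAIM (what is proved, stated in full; the proofs are below) =====
def Claim_equal_split_events_into_blocks : Prop := ∀ (events : List Int) (num_blocks : Int), Dom_split_events_into_blocks events num_blocks → Pre_split_events_into_blocks events num_blocks → Spec_split_events_into_blocks events num_blocks (split_events_into_blocks events num_blocks)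

-- ===== LEMMAS AND PROOFS =====

-- A's accumulated `start` after i iterations equals the closed form i*q + min(i, r) (for 0 ≤ r).
lemma loop_invariant (events : List Int) (q r : Int) (hr : 0 ≤ r) (n : Nat) :
    (PySem.List.pyRange 0 (n : Int) 1).foldl
      (fun (st : List (List Int) × Int) i =>
        (st.1 ++ [PySem.List.slice events (some st.2)
            (some (st.2 + q + (if i < r then 1 else 0)))],
         st.2 + q + (if i < r then 1 else 0)))
      ([], 0)
    = ((List.range n).map
        (fun k => PySem.List.slice events (some ((k : Int) * q + min (k : Int) r))
          (some (((k : Int) + 1) * q + min ((k : Int) + 1) r))),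
       (n : Int) * q + min (n : Int) r) := by
  induction n with
  | zero => simp [PySem.List.pyRange_one_eq_nil, min_eq_left hr]
  | succ m ih =>
      rw [show ((m + 1 : Nat) : Int) = (m : Int) + 1 by push_cast; ring,
          PySem.List.pyRange_one_succ_right (by exact Int.natCast_nonneg m),
          List.foldl_append, ih]
      have key : (m : Int) * q + min (m : Int) r + q + (if (m : Int) < r then 1 else 0)
          = ((m : Int) + 1) * q + min ((m : Int) + 1) r := by
        have hq : ((m : Int) + 1) * q = (m : Int) * q + q := by ring
        split_ifs with hlt <;> omega
      simp only [List.foldl_cons, List.foldl_nil, List.range_succ, key, Prod.mk.injEq]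
      refine ⟨?_, trivial⟩
      simp [List.flatMap_append]

-- One step of B's backward peel: from boundary j the peeled size is floor(bnd j / j)
-- and the new end is the boundary j-1.
lemma peel_step (q r j : Int) (hr : 0 ≤ r) (hj : 0 < j) :
    PySem.Int.floordiv (j * q + min j r) j = q + (if j ≤ r then 1 else 0) := by
  rw [PySem.Int.floordiv_eq_iff_of_pos hj]
  split_ifs with hjr
  · rw [min_eq_left hjr]; constructor <;> nlinarith
  · rw [min_eq_right (by omega)]
    constructor <;> nlinarith [hj, hr]

-- B's backward loop, started at boundary n, emits the blocks n-1 … 0 and ends at 0.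
lemma loopB (events : List Int) (q r : Int) (hr : 0 ≤ r) :
    ∀ (n : Nat) (acc : List (List Int)),
    ((PySem.List.pyRange (n : Int) 0 (-1)).foldl
      (fun (st : List (List Int) × Int) k =>
        (st.1 ++ [PySem.List.slice events
            (some (st.2 - PySem.Int.floordiv st.2 k)) (some st.2)],
         st.2 - PySem.Int.floordiv st.2 k))
      (acc, (n : Int) * q + min (n : Int) r))
    = (acc ++ ((List.range n).reverse.map
        (fun k => PySem.List.slice events (some ((k : Int) * q + min (k : Int) r))
          (some (((k : Int) + 1) * q + min ((k : Int) + 1) r)))), 0) := by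
  intro n
  induction n with
  | zero => intro acc; simp [PySem.List.pyRange_neg_one_eq_nil, min_eq_left hr]
  | succ m ih =>
      intro acc
      have hcast : ((m + 1 : Nat) : Int) = (m : Int) + 1 := by push_cast; ring
      rw [hcast, PySem.List.pyRange_neg_one_cons (by omega), List.foldl_cons]
      have hdiv : PySem.Int.floordiv (((m : Int) + 1) * q + min ((m : Int) + 1) r) ((m : Int) + 1)
          = q + (if (m : Int) + 1 ≤ r then 1 else 0) :=
        peel_step q r ((m : Int) + 1) hr (by omega)
      have hsub : ((m : Int) + 1) * q + min ((m : Int) + 1) r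
            - (q + (if (m : Int) + 1 ≤ r then 1 else 0))
          = (m : Int) * q + min (m : Int) r := by
        have hq' : ((m : Int) + 1) * q = (m : Int) * q + q := by ring
        split_ifs with hlt <;> omega
      simp only [hdiv, hsub]
      rw [show ((m : Int) + 1 - 1) = (m : Int) by ring, ih]
      simp [List.range_succ]

-- The two sides agree for positive num_blocks.
theorem split_events_into_blocks_equiv (events : List Int) (num_blocks : Int)
    (h : num_blocks ≠ 0) :
    split_events_into_blocks events num_blocks = split_events_into_blocks_alt events num_blocks := by
  unfold split_events_into_blocks split_events_into_blocks_alt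
  dsimp only
  rcases lt_trichotomy num_blocks 0 with hneg | hz | hpos
  · rw [PySem.List.pyRange_one_eq_nil (by omega), PySem.List.pyRange_neg_one_eq_nil (by omega)]
    simp
  · exact absurd hz h
  · obtain ⟨n, hn⟩ : ∃ n : Nat, num_blocks = (n : Int) := ⟨num_blocks.toNat, by omega⟩
    subst hn
    set q := PySem.Int.floordiv (events.length : Int) (n : Int) with hqdef
    set r := PySem.Int.mod (events.length : Int) (n : Int) with hrdef
    have hr : 0 ≤ r := PySem.Int.mod_nonneg _ hpos
    have hrlt : r < (n : Int) := PySem.Int.mod_lt _ hpos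
    have hlen : (events.length : Int) = (n : Int) * q + min (n : Int) r := by
      have h1 := PySem.Int.floordiv_mul_add_mod (events.length : Int) (n : Int)
      rw [← hqdef, ← hrdef] at h1
      rw [min_eq_right (le_of_lt hrlt), mul_comm]
      omega
    rw [loop_invariant events q r hr n]
    rw [hlen, loopB events q r hr n []]
    simp [← List.map_eq_flatMap, List.map_reverse]

-- ===== VERDICT (by name: the statement is the Claim_ definition above) =====
theorem split_events_into_blocks_spec : Claim_equal_split_events_into_blocks := by
  intro events num_blocks _ hpre
  exact split_events_into_blocks_equiv events num_blocks hpre
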